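-- pv_equiv track=rewrite | github.com/mandiant/capa | capa/capabilities/extract_domain_and_ip.py | too_many_consecutive_uppercase_letters
-- ===== SOURCE A (Python) =====
-- def too_many_consecutive_uppercase_letters(string, limit):
--     """
--     'HOSTENT' (probably) has the  most consecutive uppercase letters
--
--     returns:
--       True: too many consecutive uppercase letters, caller function disregards
--       False: not too many consecutive uppercase, indicates this is a potential WinAPI function
--     """
--     counter = 0
--     for i in string:
--         if i.isupper():
--             counter += 1
--         else:  # basically reset counter if we reach a non-uppercase letter
--             counter = 0
--
--         if counter > limit:
--             return True
--
--     return False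
-- ===== SOURCE B (Python) =====
-- def too_many_consecutive_uppercase_letters(string, limit):
--     # Run-grouping re-implementation: scan with two pointers, extend each maximal
--     # uppercase run and compare its whole length against the limit.
--     i, n = 0, len(string)
--     while i < n:
--         if string[i].isupper():
--             j = i
--             while j < n and string[j].isupper():
--                 j += 1
--             if j - i > limit:
--                 return True
--             i = j
--         else:
--             i += 1
--     return False
-- ===== Notes on version B (the rewrite author's own statement) =====
-- stated objective: alternative
-- what changed: B replaces A's per-character running counter (reset on non-uppercase) by an explicit two-pointer run scan that extends each maximal uppercase run and compares the run's whole length against the limit.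
-- intended difference: On a nonempty string with a negative limit and no uppercase characters, A returns True (its reset-to-0 counter still compares > a negative limit) while B returns False, which is intended since no consecutive uppercase run exists at all. — e.g. on too_many_consecutive_uppercase_letters("ab", -1): A returns true, B returns false
import Mathlib
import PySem

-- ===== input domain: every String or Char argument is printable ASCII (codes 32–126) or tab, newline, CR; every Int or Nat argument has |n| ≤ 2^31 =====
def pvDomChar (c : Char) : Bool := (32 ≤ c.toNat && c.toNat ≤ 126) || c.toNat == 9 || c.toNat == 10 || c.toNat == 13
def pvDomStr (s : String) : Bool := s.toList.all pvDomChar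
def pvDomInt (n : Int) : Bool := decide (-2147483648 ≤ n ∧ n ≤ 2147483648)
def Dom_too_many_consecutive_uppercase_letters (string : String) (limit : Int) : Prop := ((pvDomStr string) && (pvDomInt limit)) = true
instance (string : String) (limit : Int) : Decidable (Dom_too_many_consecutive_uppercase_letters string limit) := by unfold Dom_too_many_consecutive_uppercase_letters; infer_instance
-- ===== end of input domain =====

-- B replaces A's running counter by an explicit maximal-uppercase-run scan; on nonempty
-- all-non-uppercase strings with a negative limit A returns true and B returns false (see D_ below).

-- ===== PORT A =====
-- literal port of A: a running counter over the characters, reset on non-uppercase,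
-- early return when counter > limit
def pvALoop (limit : Int) : Int → List Char → Bool
  | _, [] => false
  | counter, c :: rest =>
    let counter' := if PySem.Chars.isupper c then counter + 1 else 0
    if counter' > limit then true else pvALoop limit counter' rest

def too_many_consecutive_uppercase_letters (string : String) (limit : Int) : Bool :=
  pvALoop limit 0 string.toList

-- ===== PORT B =====
-- literal port of B: pvBLoop is the outer scan (i advancing over non-uppercase chars);
-- on an uppercase char it enters pvBRun, the inner while loop that extends the maximal
-- uppercase run keeping its length n (= j - i), and at the run's end compares n with limit
mutual
def pvBLoop (limit : Int) : List Char → Bool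
  | [] => false
  | c :: rest =>
    if PySem.Chars.isupper c then pvBRun limit 1 rest else pvBLoop limit rest
  termination_by structural cs => cs

def pvBRun (limit : Int) (n : Int) : List Char → Bool
  | [] => decide (n > limit)
  | c :: rest =>
    if PySem.Chars.isupper c then pvBRun limit (n + 1) rest
    else if n > limit then true else pvBLoop limit rest
  termination_by structural cs => cs
end

def too_many_consecutive_uppercase_letters_alt (string : String) (limit : Int) : Bool :=
  pvBLoop limit string.toList

-- ===== PRECONDITION & SPEC =====
-- On a nonempty string with limit < 0 and no uppercase character, A returns true (its counter,
-- reset to 0, still compares > the negative limit) while B returns false, which is intended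
-- because the string contains no consecutive uppercase run at all.
def D_too_many_consecutive_uppercase_letters (string : String) (limit : Int) : Prop :=
  limit < 0 ∧ string.toList ≠ [] ∧ string.toList.all (fun c => !PySem.Chars.isupper c) = true
instance (string : String) (limit : Int) : Decidable (D_too_many_consecutive_uppercase_letters string limit) := by
  unfold D_too_many_consecutive_uppercase_letters; infer_instance

def Spec_too_many_consecutive_uppercase_letters (string : String) (limit : Int) (out : Bool) : Prop :=
  ¬ D_too_many_consecutive_uppercase_letters string limit → out = too_many_consecutive_uppercase_letters_alt string limit
instance (string : String) (limit : Int) (out : Bool) : Decidable (Spec_too_many_consecutive_uppercase_letters string limit out) := by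
  unfold Spec_too_many_consecutive_uppercase_letters; infer_instance

def pvDiffWitness_too_many_consecutive_uppercase_letters : String × Int := ("ab", -1)
def pvDiffWitnessOut_too_many_consecutive_uppercase_letters : Bool × Bool := (true, false)

-- ===== CLAIM =====
def Claim_unchanged_too_many_consecutive_uppercase_letters : Prop := ∀ (string : String) (limit : Int), Dom_too_many_consecutive_uppercase_letters string limit → Spec_too_many_consecutive_uppercase_letters string limit (too_many_consecutive_uppercase_letters string limit)
def Claim_changed_too_many_consecutive_uppercase_letters : Prop := Dom_too_many_consecutive_uppercase_letters (pvDiffWitness_too_many_consecutive_uppercase_letters.1) (pvDiffWitness_too_many_consecutive_uppercase_letters.2) ∧ D_too_many_consecutive_uppercase_letters (pvDiffWitness_too_many_consecutive_uppercase_letters.1) (pvDiffWitness_too_many_consecutive_uppercase_letters.2) ∧ too_many_consecutive_uppercase_letters (pvDiffWitness_too_many_consecutive_uppercase_letters.1) (pvDiffWitness_too_many_consecutive_uppercase_letters.2) = pvDiffWitnessOut_too_many_consecutive_uppercase_letters.1 ∧ too_many_consecutive_uppercase_letters_alt (pvDiffWitness_too_many_consecutive_uppercase_letters.1) (pvDiffWitness_too_many_consecutive_uppercase_letters.2)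 = pvDiffWitnessOut_too_many_consecutive_uppercase_letters.2 ∧ pvDiffWitnessOut_too_many_consecutive_uppercase_letters.1 ≠ pvDiffWitnessOut_too_many_consecutive_uppercase_letters.2
def Claim_exact_too_many_consecutive_uppercase_letters : Prop := ∀ (string : String) (limit : Int), Dom_too_many_consecutive_uppercase_letters string limit → D_too_many_consecutive_uppercase_letters string limit → too_many_consecutive_uppercase_letters string limit ≠ too_many_consecutive_uppercase_letters_alt string limit

-- ===== LEMMAS AND PROOFS =====

theorem pvBLoop_nil (limit : Int) : pvBLoop limit [] = false := by
  rw [pvBLoop]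

theorem pvBLoop_cons_neg (limit : Int) (c : Char) (rest : List Char)
    (h : PySem.Chars.isupper c = false) : pvBLoop limit (c :: rest) = pvBLoop limit rest := by
  rw [pvBLoop]
  simp [h]

-- the in-run scan: remaining run length added to n, then the outer scan resumes after the run
theorem pvBRun_eq (limit : Int) (rest : List Char) : ∀ n : Int,
    pvBRun limit n rest =
      (decide (n + ((rest.takeWhile PySem.Chars.isupper).length : Int) > limit) ||
        pvBLoop limit (rest.dropWhile PySem.Chars.isupper)) := by
  induction rest with
  | nil =>
    intro n
    rw [pvBRun]
    simp [pvBLoop_nil]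
  | cons c r ih =>
    intro n
    by_cases h : PySem.Chars.isupper c
    · rw [pvBRun]
      simp only [h, if_true, List.takeWhile_cons_of_pos h, List.dropWhile_cons_of_pos h,
        List.length_cons, ih (n + 1)]
      congr 1
      rw [decide_eq_decide]
      push_cast
      omega
    · simp only [Bool.not_eq_true] at h
      have hnc : ¬ (PySem.Chars.isupper c = true) := by simp [h]
      rw [pvBRun]
      simp only [h, Bool.false_eq_true, if_false,
        List.takeWhile_cons_of_neg hnc, List.dropWhile_cons_of_neg hnc,
        pvBLoop_cons_neg limit c r h]
      by_cases h2 : n > limit <;> simp [h2]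

-- B's loop, one run at a time (needs 0 ≤ limit so an empty run never triggers)
theorem pvBLoop_step (limit : Int) (hlim : 0 ≤ limit) (cs : List Char) :
    pvBLoop limit cs =
      (decide (((cs.takeWhile PySem.Chars.isupper).length : Int) > limit) ||
        pvBLoop limit (cs.dropWhile PySem.Chars.isupper)) := by
  cases cs with
  | nil =>
    simp only [List.takeWhile_nil, List.dropWhile_nil, pvBLoop_nil]
    simp
    omega
  | cons c rest =>
    by_cases h : PySem.Chars.isupper c
    · rw [pvBLoop]
      simp only [h, if_true, pvBRun_eq limit rest 1,
        List.takeWhile_cons_of_pos h, List.dropWhile_cons_of_pos h, List.length_cons]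
      congr 1
      rw [decide_eq_decide]
      push_cast
      omega
    · simp only [Bool.not_eq_true] at h
      have hnc : ¬ (PySem.Chars.isupper c = true) := by simp [h]
      simp only [List.takeWhile_cons_of_neg hnc, List.dropWhile_cons_of_neg hnc,
        List.length_nil, Nat.cast_zero]
      rw [decide_eq_false (by omega : ¬ ((0 : Int) > limit))]
      simp

-- A's loop equals "current run would overflow, or B on the rest"
theorem pvALoop_eq (limit : Int) (cs : List Char) :
    ∀ counter : Int, 0 ≤ counter → counter ≤ limit →
      pvALoop limit counter cs =
        (decide (counter + ((cs.takeWhile PySem.Chars.isupper).length : Int) > limit) ||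
          pvBLoop limit (cs.dropWhile PySem.Chars.isupper)) := by
  induction cs with
  | nil =>
    intro counter h0 h1
    rw [pvALoop]
    simp only [List.takeWhile_nil, List.dropWhile_nil, pvBLoop_nil]
    simp
    omega
  | cons c rest ih =>
    intro counter h0 h1
    by_cases h : PySem.Chars.isupper c
    · rw [pvALoop]
      simp only [h, if_true,
        List.takeWhile_cons_of_pos h, List.dropWhile_cons_of_pos h, List.length_cons]
      by_cases h2 : counter + 1 > limit
      · rw [if_pos h2]
        symm
        rw [Bool.or_eq_true]
        left
        rw [decide_eq_true_iff]
        have := Int.natCast_nonneg (rest.takeWhile PySem.Chars.isupper).length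
        push_cast
        omega
      · rw [if_neg h2, ih (counter + 1) (by omega) (by omega)]
        congr 1
        rw [decide_eq_decide]
        push_cast
        omega
    · simp only [Bool.not_eq_true] at h
      have hnc : ¬ (PySem.Chars.isupper c = true) := by simp [h]
      have hl : 0 ≤ limit := le_trans h0 h1
      rw [pvALoop]
      simp only [h, Bool.false_eq_true, if_false]
      rw [if_neg (by omega : ¬ ((0:Int) > limit)), ih 0 le_rfl hl,
        List.takeWhile_cons_of_neg hnc, List.dropWhile_cons_of_neg hnc,
        pvBLoop_cons_neg limit c rest h, pvBLoop_step limit hl rest]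
      simp only [List.length_nil, Nat.cast_zero, add_zero, zero_add]
      rw [decide_eq_false (by omega : ¬ (counter > limit))]
      simp

-- limit < 0: A returns true on any nonempty string (counter ≥ 0 > limit at the first step)
theorem pvALoop_neg (limit : Int) (hlim : limit < 0) (counter : Int) (h0 : 0 ≤ counter)
    (c : Char) (rest : List Char) : pvALoop limit counter (c :: rest) = true := by
  rw [pvALoop]
  by_cases h : PySem.Chars.isupper c <;> simp [h] <;> omega

-- limit < 0: B returns true as soon as some uppercase character exists
theorem pvBLoop_neg (limit : Int) (hlim : limit < 0) (cs : List Char)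
    (h : ∃ c ∈ cs, PySem.Chars.isupper c = true) : pvBLoop limit cs = true := by
  induction cs with
  | nil => simp at h
  | cons c rest ih =>
    by_cases hc : PySem.Chars.isupper c
    · rw [pvBLoop]
      simp only [hc, if_true, pvBRun_eq limit rest 1]
      have := Int.natCast_nonneg (rest.takeWhile PySem.Chars.isupper).length
      rw [decide_eq_true (by omega : (1 + ((rest.takeWhile PySem.Chars.isupper).length : Int) > limit))]
      simp
    · simp only [Bool.not_eq_true] at hc
      rw [pvBLoop_cons_neg limit c rest hc]
      apply ih
      rcases h with ⟨d, hd, hdu⟩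
      rcases List.mem_cons.mp hd with rfl | hd'
      · exact absurd hdu (by simp [hc])
      · exact ⟨d, hd', hdu⟩

-- B returns false when no character is uppercase
theorem pvBLoop_none (limit : Int) (cs : List Char)
    (h : ∀ c ∈ cs, PySem.Chars.isupper c = false) : pvBLoop limit cs = false := by
  induction cs with
  | nil => exact pvBLoop_nil limit
  | cons c rest ih =>
    rw [pvBLoop_cons_neg limit c rest (h c (by simp))]
    exact ih (fun d hd => h d (by simp [hd]))

-- ===== VERDICT =====
theorem too_many_consecutive_uppercase_letters_spec : Claim_unchanged_too_many_consecutive_uppercase_letters := by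
  intro string limit _ hnd
  unfold too_many_consecutive_uppercase_letters too_many_consecutive_uppercase_letters_alt
  by_cases hlim : 0 ≤ limit
  · rw [pvALoop_eq limit string.toList 0 le_rfl hlim, pvBLoop_step limit hlim string.toList]
    simp
  · have hlim' : limit < 0 := by omega
    cases hcs : string.toList with
    | nil => rw [pvALoop, pvBLoop_nil]
    | cons c rest =>
      rw [pvALoop_neg limit hlim' 0 le_rfl c rest]
      by_cases hup : ∃ d ∈ (c :: rest), PySem.Chars.isupper d = true
      · rw [pvBLoop_neg limit hlim' _ hup]
      · exfalso
        apply hnd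
        refine ⟨hlim', by simp [hcs], ?_⟩
        rw [List.all_eq_true]
        intro d hd
        rw [hcs] at hd
        by_contra hne
        exact hup ⟨d, hd, by simpa using hne⟩

theorem too_many_consecutive_uppercase_letters_changed : Claim_changed_too_many_consecutive_uppercase_letters := by
  unfold Claim_changed_too_many_consecutive_uppercase_letters; decide

theorem too_many_consecutive_uppercase_letters_tight : Claim_exact_too_many_consecutive_uppercase_letters := by
  intro string limit _ hd
  rcases hd with ⟨hlim, hne, hall⟩
  unfold too_many_consecutive_uppercase_letters too_many_consecutive_uppercase_letters_alt
  cases hcs : string.toList with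
  | nil => exact absurd hcs hne
  | cons c rest =>
    have hall' : ∀ d ∈ (c :: rest), PySem.Chars.isupper d = false := by
      intro d hd'
      have := List.all_eq_true.mp hall d (by rw [hcs]; exact hd')
      simpa using this
    rw [pvALoop_neg limit hlim 0 le_rfl c rest, pvBLoop_none limit (c :: rest) hall']
    simp
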